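-- pv_equiv track=rewrite | github.com/stkisengese/news-intelligence-nlp-platform | utils/scandal_detection.py | extract_entity_sentences
-- ===== SOURCE A (Python) =====
-- def extract_entity_sentences(text, entities):
--     """Extracts sentences from the text that contain any of the given entities.
--
--     Args:
--         text (str): The text to extract sentences from.
--         entities (list): A list of entities to look for.
--
--     Returns:
--         list: A list of sentences containing the entities.
--     """
--     sentences = []
--     for sentence in text.split('.'):
--         for entity in entities:
--             if entity in sentence:
--                 sentences.append(sentence)
--                 break
--     return sentences
-- ===== SOURCE B (Python) =====
-- def extract_entity_sentences(text, entities):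
--     """Extracts sentences from the text that contain any of the given entities.
--
--     Inverted loop order: outer loop over entities, marking the indices of the
--     sentences each entity occurs in, then emit the marked sentences in order.
--     """
--     sentences = text.split('.')
--     hits = set()
--     for entity in entities:
--         for i, sentence in enumerate(sentences):
--             if i not in hits and entity in sentence:
--                 hits.add(i)
--     return [s for i, s in enumerate(sentences) if i in hits]
-- ===== Notes on version B (the rewrite author's own statement) =====
-- stated objective: alternative
-- what changed: Loop order inverted: instead of scanning the entity list per sentence with an early break, B iterates entities in the outer loop, collects the set of matching sentence indices, and finally emits the marked sentences in text order.
import Mathlib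
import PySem

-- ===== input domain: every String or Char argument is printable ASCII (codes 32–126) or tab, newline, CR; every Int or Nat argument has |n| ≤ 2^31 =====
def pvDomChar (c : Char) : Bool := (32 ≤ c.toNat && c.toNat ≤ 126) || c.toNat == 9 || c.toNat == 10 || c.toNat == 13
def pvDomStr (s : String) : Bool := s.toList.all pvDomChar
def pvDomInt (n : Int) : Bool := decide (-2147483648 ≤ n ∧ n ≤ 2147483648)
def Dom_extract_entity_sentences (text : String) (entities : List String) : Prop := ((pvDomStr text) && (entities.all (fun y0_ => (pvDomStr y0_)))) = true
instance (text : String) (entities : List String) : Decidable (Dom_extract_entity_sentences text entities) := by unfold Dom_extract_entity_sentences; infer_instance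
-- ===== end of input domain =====

-- B inverts A's loop order: outer loop over entities marks the set of matching sentence
-- indices (skipping already-marked ones), then the marked sentences are emitted in text order;
-- same cost, genuinely different traversal (objective: alternative).

-- ===== PORT A =====
def innerAnyA (sentence : String) : List String → Bool
  | [] => false
  | e :: rest => if PySem.Str.isIn e sentence then true else innerAnyA sentence rest

-- text.split(".") with nonempty separator: Str.split? returns some, so .getD [] is exact
-- A: for each sentence of text.split('.'), scan entities with an early break, appending on first hit.
def extract_entity_sentences (text : String) (entities : List String) : List String :=
  (((PySem.Str.split? text ".").getD [])).foldl
    (fun sentences sentence =>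
      if innerAnyA sentence entities then sentences ++ [sentence] else sentences) []

-- ===== PORT B =====
-- B: inverted loop order — mark matching sentence indices per entity, then emit marked sentences in order.
def extract_entity_sentences_alt (text : String) (entities : List String) : List String :=
  let sentences := ((PySem.Str.split? text ".").getD [])
  let hits : PySem.Set Int :=
    entities.foldl
      (fun h entity =>
        (PySem.List.enumerate sentences).foldl
          (fun h p =>
            if !(PySem.Set.contains h p.1) && PySem.Str.isIn entity p.2 then PySem.Set.add h p.1
            else h) h)
      PySem.Set.empty
  ((PySem.List.enumerate sentences).filter (fun p => PySem.Set.contains hits p.1)).map (·.2)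

-- ===== PRECONDITION & SPEC =====
def Spec_extract_entity_sentences (text : String) (entities : List String) (out : List String) : Prop := out = extract_entity_sentences_alt text entities
instance (text : String) (entities : List String) (out : List String) : Decidable (Spec_extract_entity_sentences text entities out) := by unfold Spec_extract_entity_sentences; infer_instance

-- ===== CLAIM (what is proved, stated in full; the proofs are below) =====
def Claim_equal_extract_entity_sentences : Prop := ∀ (text : String) (entities : List String), Dom_extract_entity_sentences text entities → Spec_extract_entity_sentences text entities (extract_entity_sentences text entities)

-- ===== LEMMAS AND PROOFS =====


-- inner break-loop of A = List.any
theorem innerAnyA_eq_any (s : String) (es : List String) :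
    innerAnyA s es = es.any (fun e => PySem.Str.isIn e s) := by
  induction es with
  | nil => rfl
  | cons e rest ih => cases hb : PySem.Str.isIn e s <;> simp [innerAnyA, ih]

-- membership in the inner index-marking fold (one entity)
theorem mem_inner_fold (e : String) (l : List (Int × String)) (h0 : PySem.Set Int) (x : Int) :
    x ∈ l.foldl
        (fun h p =>
          if !(PySem.Set.contains h p.1) && PySem.Str.isIn e p.2 then PySem.Set.add h p.1
          else h) h0 ↔
      x ∈ h0 ∨ ∃ p ∈ l, p.1 = x ∧ PySem.Str.isIn e p.2 = true := by
  induction l generalizing h0 with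
  | nil => simp
  | cons q t ih =>
    simp only [List.foldl_cons]
    by_cases hc : PySem.Set.contains h0 q.1 = true
    · have hq : q.1 ∈ h0 := (PySem.Set.contains_iff _ _).mp hc
      rw [show (if (!PySem.Set.contains h0 q.1 && PySem.Str.isIn e q.2) = true
            then PySem.Set.add h0 q.1 else h0) = h0 by rw [hc]; rfl]
      simp only [ih, List.mem_cons]
      constructor
      · rintro (hx | ⟨p, hp, rfl, hm⟩)
        · exact Or.inl hx
        · exact Or.inr ⟨p, Or.inr hp, rfl, hm⟩
      · rintro (hx | ⟨p, rfl | hp, rfl, hm⟩)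
        · exact Or.inl hx
        · exact Or.inl hq
        · exact Or.inr ⟨p, hp, rfl, hm⟩
    · have hc' : PySem.Set.contains h0 q.1 = false := by
        cases hcv : PySem.Set.contains h0 q.1
        · rfl
        · exact absurd hcv hc
      by_cases h : PySem.Str.isIn e q.2 = true
      · rw [show (if (!PySem.Set.contains h0 q.1 && PySem.Str.isIn e q.2) = true
              then PySem.Set.add h0 q.1 else h0) = PySem.Set.add h0 q.1 by rw [hc', h]; rfl]
        simp only [ih, PySem.Set.mem_add, List.mem_cons]
        constructor
        · rintro (⟨hx | rfl⟩ | ⟨p, hp, rfl, hm⟩)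
          · exact Or.inl hx
          · exact Or.inr ⟨q, Or.inl rfl, rfl, h⟩
          · exact Or.inr ⟨p, Or.inr hp, rfl, hm⟩
        · rintro (hx | ⟨p, rfl | hp, rfl, hm⟩)
          · exact Or.inl (Or.inl hx)
          · exact Or.inl (Or.inr rfl)
          · exact Or.inr ⟨p, hp, rfl, hm⟩
      · have h' : PySem.Str.isIn e q.2 = false := by
          cases hv : PySem.Str.isIn e q.2
          · rfl
          · exact absurd hv h
        rw [show (if (!PySem.Set.contains h0 q.1 && PySem.Str.isIn e q.2) = true
              then PySem.Set.add h0 q.1 else h0) = h0 by rw [hc', h']; rfl]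
        simp only [ih, List.mem_cons]
        constructor
        · rintro (hx | ⟨p, hp, rfl, hm⟩)
          · exact Or.inl hx
          · exact Or.inr ⟨p, Or.inr hp, rfl, hm⟩
        · rintro (hx | ⟨p, rfl | hp, rfl, hm⟩)
          · exact Or.inl hx
          · exact absurd hm h
          · exact Or.inr ⟨p, hp, rfl, hm⟩

-- membership in the whole hits set
theorem mem_hits_fold (es : List String) (l : List (Int × String)) (h0 : PySem.Set Int) (x : Int) :
    x ∈ es.foldl
        (fun h entity =>
          l.foldl
            (fun h p =>
              if !(PySem.Set.contains h p.1) && PySem.Str.isIn entity p.2 then PySem.Set.add h p.1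
              else h) h) h0 ↔
      x ∈ h0 ∨ ∃ e ∈ es, ∃ p ∈ l, p.1 = x ∧ PySem.Str.isIn e p.2 = true := by
  induction es generalizing h0 with
  | nil => simp
  | cons e rest ih =>
    simp only [List.foldl_cons, ih, mem_inner_fold, List.mem_cons]
    constructor
    · rintro ((hx | hp) | ⟨e', he', hp⟩)
      · exact Or.inl hx
      · exact Or.inr ⟨e, Or.inl rfl, hp⟩
      · exact Or.inr ⟨e', Or.inr he', hp⟩
    · rintro (hx | ⟨e', rfl | he', hp⟩)
      · exact Or.inl (Or.inl hx)
      · exact Or.inl (Or.inr hp)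
      · exact Or.inr ⟨e', he', hp⟩

-- filtering the enumeration by a predicate on the value, then dropping the index
theorem filter_enumerate_map (P : String → Bool) (xs : List String) (s : Int) :
    ((PySem.List.enumerate xs s).filter (fun p => P p.2)).map (·.2) = xs.filter P := by
  induction xs generalizing s with
  | nil => simp [PySem.List.enumerate_nil]
  | cons x t ih =>
    simp only [PySem.List.enumerate_cons, List.filter_cons]
    by_cases h : P x = true
    · simp [h, ih]
    · simp [h, ih]

-- ===== VERDICT (by name: the statement is the Claim_ definition above) =====
theorem extract_entity_sentences_spec : Claim_equal_extract_entity_sentences := by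
  intro text entities _
  unfold Spec_extract_entity_sentences extract_entity_sentences extract_entity_sentences_alt
  rw [PySem.List.foldl_append_if_eq_filter]
  simp only [List.nil_append]
  have hpt : ∀ p ∈ PySem.List.enumerate ((PySem.Str.split? text ".").getD []) 0,
      PySem.Set.contains
        (entities.foldl
          (fun h entity =>
            (PySem.List.enumerate ((PySem.Str.split? text ".").getD []) 0).foldl
              (fun h p =>
                if !(PySem.Set.contains h p.1) && PySem.Str.isIn entity p.2 then
                  PySem.Set.add h p.1
                else h) h)
          PySem.Set.empty) p.1
      = innerAnyA p.2 entities := by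
    intro p hp
    rcases ((PySem.List.mem_enumerate_iff _ _ _).mp hp) with ⟨k, hk, rfl⟩
    rw [innerAnyA_eq_any, Bool.eq_iff_iff, PySem.Set.contains_iff, mem_hits_fold,
      List.any_eq_true]
    constructor
    · rintro (hx | ⟨e, he, q, hq, hqx, hm⟩)
      · simp [PySem.Set.empty] at hx
      · rcases ((PySem.List.mem_enumerate_iff _ _ _).mp hq) with ⟨k', hk', rfl⟩
        have : k' = k := by omega
        subst this
        exact ⟨e, he, hm⟩
    · rintro ⟨e, he, hm⟩
      exact Or.inr ⟨e, he, _, (PySem.List.mem_enumerate_iff _ _ _).mpr ⟨k, hk, rfl⟩, rfl, hm⟩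
  rw [List.filter_congr hpt,
    filter_enumerate_map (fun s => innerAnyA s entities) ((PySem.Str.split? text ".").getD []) 0]
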